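-- pv_equiv track=rewrite | github.com/zhaoyu-z/project-euler | src/27.py | quadratic_primes
-- ===== SOURCE A (Python) =====
-- from math import sqrt
--
-- def is_prime(n):
--     if n < 2: return False
--     if n == 2: return True
--     for i in range(3, int(sqrt(n)+1), 2):
--         if n % i == 0:
--             return False
--     return True
--
-- def get_num_primes_equation(a, b):
--     n = 0
--     while True:
--         equation = n ** 2 + a * n + b
--         if not is_prime(equation):
--             break
--         n += 1
--     return n
--
-- def quadratic_primes(a_lower, a_higher, b_lower, b_higher):
--     best, besta, bestb = 0, 0, 0
--     for a in range(a_lower, a_higher+1):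
--         """
--         b must be positive, because when n=0 case where the expression can be reduced to b,
--          which therefore has to be prime.
--         """
--         for b in range(2, b_higher+1):
--             c = get_num_primes_equation(a, b)
--             if c > best:
--                 best, besta, bestb = c, a, b
--     return besta * bestb
-- ===== SOURCE B (Python) =====
-- from math import sqrt
--
-- def quadratic_primes(a_lower, a_higher, b_lower, b_higher):
--     if a_higher < a_lower:
--         return 0
--     cache = {}
--
--     def chain_prime(v):
--         r = cache.get(v)
--         if r is None:
--             r = v >= 2 and all(v % i for i in range(3, int(sqrt(v) + 1), 2))
--             cache[v] = r
--         return r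
--
--     bs = [b for b in range(2, b_higher + 1) if chain_prime(b)]
--     best = besta = bestb = 0
--     for a in range(a_lower, a_higher + 1):
--         for b in bs:
--             n = 0
--             while chain_prime(n * n + a * n + b):
--                 n += 1
--             if n > best:
--                 best, besta, bestb = n, a, b
--     return besta * bestb
-- ===== Notes on version B (the rewrite author's own statement) =====
-- stated objective: alternative
-- what changed: B computes the list of chain-starting b values once (instead of restarting and immediately breaking a chain for every (a,b) pair) and memoizes the shared primality test in a dict, so each distinct quadratic value is trial-divided at most once across the whole search.
import Mathlib
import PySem

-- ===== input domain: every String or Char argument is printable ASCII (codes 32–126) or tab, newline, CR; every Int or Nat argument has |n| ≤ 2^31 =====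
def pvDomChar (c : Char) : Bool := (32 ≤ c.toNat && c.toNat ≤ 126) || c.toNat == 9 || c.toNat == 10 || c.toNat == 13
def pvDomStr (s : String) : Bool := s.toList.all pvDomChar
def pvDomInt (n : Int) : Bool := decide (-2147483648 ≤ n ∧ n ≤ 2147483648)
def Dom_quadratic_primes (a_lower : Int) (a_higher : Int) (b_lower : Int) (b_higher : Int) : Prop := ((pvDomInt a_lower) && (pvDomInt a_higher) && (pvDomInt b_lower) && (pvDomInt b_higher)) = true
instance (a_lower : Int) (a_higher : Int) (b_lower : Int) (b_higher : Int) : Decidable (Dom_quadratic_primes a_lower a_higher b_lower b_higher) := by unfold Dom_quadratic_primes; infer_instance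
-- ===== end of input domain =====

-- B prefilters b to the chain-starting values once (instead of restarting a chain for every
-- (a, b)) and memoizes the primality test in a dict, so each distinct quadratic value is
-- trial-divided at most once.  (b_lower is unused by A; B keeps that.)
-- Both Pythons loop `while True` on a chain that always breaks in practice; both ports run
-- that loop on the same large fuel (the chain lengths reached in the tested domain are tiny).
-- Python's int(sqrt(n)+1) (float math.sqrt) is ported by hand in BOTH ports as floor-sqrt + 1
-- (fueled binary search, kernel-transparent): exact for the values this search reaches
-- (below 2^52, where the double sqrt of an integer is correctly rounded and truncates to floor).

-- ===== PORT A =====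
-- hand port of int(sqrt(n)+1): binary-search floor square root (64 halvings cover Nat range)
def isqrtAux (n : Nat) : Nat → Nat → Nat → Nat
  | 0, lo, _ => lo
  | f + 1, lo, hi =>
    if hi ≤ lo + 1 then lo
    else
      let m := (lo + hi) / 2
      if m * m ≤ n then isqrtAux n f m hi else isqrtAux n f lo m

def pySqrtP1 (n : Int) : Int := ((isqrtAux n.toNat 64 0 (n.toNat + 1) + 1 : Nat) : Int)

def pvFuel : Nat := 1000000

def is_prime (n : Int) : Bool :=
  if n < 2 then false
  else if n = 2 then true
  else (PySem.List.pyRange 3 (pySqrtP1 n) 2).all (fun i => !(PySem.Int.mod n i == 0))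

def get_num_primes_equation (fuel : Nat) (a b n : Int) : Int :=
  match fuel with
  | 0 => n
  | f + 1 => if is_prime (n ^ 2 + a * n + b) then get_num_primes_equation f a b (n + 1) else n

-- the body of A's inner `for b` loop on the running (best, besta, bestb)
def stepA (a : Int) (st : Int × Int × Int) (b : Int) : Int × Int × Int :=
  let c := get_num_primes_equation pvFuel a b 0
  if st.1 < c then (c, a, b) else st

def quadratic_primes (a_lower : Int) (a_higher : Int) (b_lower : Int) (b_higher : Int) : Int :=
  let st := (PySem.List.pyRange a_lower (a_higher + 1) 1).foldl
    (fun st a => (PySem.List.pyRange 2 (b_higher + 1) 1).foldl (stepA a) st)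
    ((0 : Int), (0 : Int), (0 : Int))
  st.2.1 * st.2.2

-- ===== PORT B =====
-- the memoized primality test: dict lookup, else compute and store
def chainPrimeTest (v : Int) : Bool :=
  decide (2 ≤ v) && (PySem.List.pyRange 3 (pySqrtP1 v) 2).all (fun i => !(PySem.Int.mod v i == 0))

def chain_prime (cache : PySem.Dict Int Bool) (v : Int) : Bool × PySem.Dict Int Bool :=
  match cache.get? v with
  | some r => (r, cache)
  | none => (chainPrimeTest v, cache.insert v (chainPrimeTest v))

-- the inlined `while chain_prime(n*n + a*n + b): n += 1` loop, threading the cache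
def chainB (fuel : Nat) (cache : PySem.Dict Int Bool) (a b n : Int) : Int × PySem.Dict Int Bool :=
  match fuel with
  | 0 => (n, cache)
  | f + 1 =>
    let p := chain_prime cache (n * n + a * n + b)
    if p.1 then chainB f p.2 a b (n + 1) else (n, p.2)

-- `bs = [b for b in range(2, b_higher+1) if chain_prime(b)]`, threading the cache
def bsStep (acc : List Int × PySem.Dict Int Bool) (b : Int) : List Int × PySem.Dict Int Bool :=
  let p := chain_prime acc.2 b
  (if p.1 then acc.1 ++ [b] else acc.1, p.2)

-- the body of B's inner `for b in bs` loop on (best, besta, bestb, cache)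
def stepB (a : Int) (st : Int × Int × Int × PySem.Dict Int Bool) (b : Int) :
    Int × Int × Int × PySem.Dict Int Bool :=
  let r := chainB pvFuel st.2.2.2 a b 0
  if st.1 < r.1 then (r.1, a, b, r.2) else (st.1, st.2.1, st.2.2.1, r.2)

def quadratic_primes_alt (a_lower : Int) (a_higher : Int) (b_lower : Int) (b_higher : Int) : Int :=
  if a_higher < a_lower then 0 else
  let init := (PySem.List.pyRange 2 (b_higher + 1) 1).foldl bsStep
    (([] : List Int), (PySem.Dict.empty : PySem.Dict Int Bool))
  let st := (PySem.List.pyRange a_lower (a_higher + 1) 1).foldl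
    (fun st a => init.1.foldl (stepB a) st)
    ((0 : Int), (0 : Int), (0 : Int), init.2)
  st.2.1 * st.2.2.1

-- ===== PRECONDITION & SPEC =====
def Spec_quadratic_primes (a_lower : Int) (a_higher : Int) (b_lower : Int) (b_higher : Int) (out : Int) : Prop := out = quadratic_primes_alt a_lower a_higher b_lower b_higher
instance (a_lower : Int) (a_higher : Int) (b_lower : Int) (b_higher : Int) (out : Int) : Decidable (Spec_quadratic_primes a_lower a_higher b_lower b_higher out) := by unfold Spec_quadratic_primes; infer_instance

-- ===== CLAIM (what is proved, stated in full; the proofs are below) =====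
def Claim_equal_quadratic_primes : Prop := ∀ (a_lower : Int) (a_higher : Int) (b_lower : Int) (b_higher : Int), Dom_quadratic_primes a_lower a_higher b_lower b_higher → Spec_quadratic_primes a_lower a_higher b_lower b_higher (quadratic_primes a_lower a_higher b_lower b_higher)

-- ===== LEMMAS AND PROOFS =====

-- the cache invariant: every stored answer is the pure test's answer
def GoodCache (d : PySem.Dict Int Bool) : Prop :=
  ∀ v r, d.get? v = some r → r = chainPrimeTest v

lemma chainPrimeTest_eq_is_prime (v : Int) : chainPrimeTest v = is_prime v := by
  unfold chainPrimeTest is_prime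
  by_cases h1 : v < 2
  · simp [h1, show ¬ (2 : Int) ≤ v by omega]
  · by_cases h2 : v = 2
    · subst h2; decide
    · simp [h1, h2, show (2 : Int) ≤ v by omega]

lemma goodCache_empty : GoodCache PySem.Dict.empty := by
  intro v r h
  simp [PySem.Dict.get?_empty] at h

lemma chain_prime_fst (d : PySem.Dict Int Bool) (v : Int) (h : GoodCache d) :
    (chain_prime d v).1 = is_prime v := by
  unfold chain_prime
  cases hd : d.get? v with
  | some r => simpa [chainPrimeTest_eq_is_prime] using h v r hd
  | none => simp [chainPrimeTest_eq_is_prime]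

lemma chain_prime_good (d : PySem.Dict Int Bool) (v : Int) (h : GoodCache d) :
    GoodCache (chain_prime d v).2 := by
  unfold chain_prime
  cases hd : d.get? v with
  | some r => exact h
  | none =>
    intro w r hw
    rw [PySem.Dict.get?_insert] at hw
    by_cases hvw : w = v
    · subst hvw
      rw [if_pos rfl] at hw
      exact (Option.some.inj hw).symm
    · rw [if_neg hvw] at hw
      exact h w r hw

lemma chainB_eq (fuel : Nat) (a b : Int) :
    ∀ (n : Int) (d : PySem.Dict Int Bool), GoodCache d →
      (chainB fuel d a b n).1 = get_num_primes_equation fuel a b n ∧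
      GoodCache (chainB fuel d a b n).2 := by
  induction fuel with
  | zero => intro n d h; exact ⟨rfl, h⟩
  | succ f ih =>
    intro n d h
    have hf := chain_prime_fst d (n * n + a * n + b) h
    have hg := chain_prime_good d (n * n + a * n + b) h
    unfold chainB get_num_primes_equation
    rw [show n ^ 2 + a * n + b = n * n + a * n + b by ring]
    simp only [hf]
    by_cases hp : is_prime (n * n + a * n + b) = true
    · rw [if_pos hp, if_pos hp]
      exact ih (n + 1) _ hg
    · rw [if_neg hp, if_neg hp]
      exact ⟨rfl, hg⟩

-- chain length is at least the starting index
lemma chain_ge (fuel : Nat) (a b : Int) :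
    ∀ n : Int, n ≤ get_num_primes_equation fuel a b n := by
  induction fuel with
  | zero => intro n; exact le_refl n
  | succ f ih =>
    intro n
    unfold get_num_primes_equation
    split
    · exact le_trans (by omega) (ih (n + 1))
    · exact le_refl n

-- a non-chain-starting b yields chain length 0 (the n = 0 test is is_prime b)
lemma chain_zero_of_not_prime (a b : Int) (hb : ¬ is_prime b) :
    get_num_primes_equation pvFuel a b 0 = 0 := by
  show get_num_primes_equation (999999 + 1) a b 0 = 0
  unfold get_num_primes_equation
  rw [show (0 : Int) ^ 2 + a * 0 + b = b by ring]
  simp [hb]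

-- the b-prefilter fold returns exactly the filtered range and a good cache
lemma bs_fold (l : List Int) :
    ∀ (acc : List Int × PySem.Dict Int Bool), GoodCache acc.2 →
      (l.foldl bsStep acc).1 = acc.1 ++ l.filter is_prime ∧
      GoodCache (l.foldl bsStep acc).2 := by
  induction l with
  | nil => intro acc h; exact ⟨by simp, h⟩
  | cons b t ih =>
    intro acc h
    have hf := chain_prime_fst acc.2 b h
    have hg : GoodCache (bsStep acc b).2 := by
      simp only [bsStep]
      exact chain_prime_good acc.2 b h
    simp only [List.foldl_cons, List.filter_cons]
    obtain ⟨h1, h2⟩ := ih (bsStep acc b) hg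
    refine ⟨?_, h2⟩
    rw [h1]
    by_cases hp : is_prime b
    · simp [bsStep, hf, hp]
    · simp [bsStep, hf, hp]

lemma stepA_nonneg (a : Int) (st : Int × Int × Int) (b : Int) (h : 0 ≤ st.1) :
    0 ≤ (stepA a st b).1 := by
  have := chain_ge pvFuel a b 0
  simp only [stepA]
  split
  · simpa using this
  · exact h

lemma foldl_stepA_nonneg (a : Int) (l : List Int) :
    ∀ st : Int × Int × Int, 0 ≤ st.1 → 0 ≤ (l.foldl (stepA a) st).1 := by
  induction l with
  | nil => intro st h; exact h
  | cons b t ih => intro st h; exact ih _ (stepA_nonneg a st b h)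

-- skipping the b's that start no chain does not change A's inner fold
lemma foldl_stepA_filter (a : Int) (l : List Int) :
    ∀ st : Int × Int × Int, 0 ≤ st.1 →
      l.foldl (stepA a) st = (l.filter is_prime).foldl (stepA a) st := by
  induction l with
  | nil => intro st _; rfl
  | cons b t ih =>
    intro st h
    simp only [List.foldl_cons, List.filter_cons]
    by_cases hp : is_prime b
    · simp only [hp, if_pos]
      exact ih _ (stepA_nonneg a st b h)
    · have hz := chain_zero_of_not_prime a b hp
      have hst : stepA a st b = st := by
        simp only [stepA, hz]
        rw [if_neg (by omega)]
      simp only [hp, Bool.false_eq_true, if_neg, not_false_iff, hst]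
      exact ih st h

-- one B-step projects to one A-step and keeps the cache good
lemma stepB_proj (a : Int) (st : Int × Int × Int × PySem.Dict Int Bool) (b : Int)
    (h : GoodCache st.2.2.2) :
    ((stepB a st b).1, (stepB a st b).2.1, (stepB a st b).2.2.1)
      = stepA a (st.1, st.2.1, st.2.2.1) b ∧ GoodCache (stepB a st b).2.2.2 := by
  obtain ⟨h1, h2⟩ := chainB_eq pvFuel a b 0 st.2.2.2 h
  simp only [stepB, stepA, h1]
  split <;> exact ⟨rfl, h2⟩

-- cache elimination for B's inner fold: the triple part equals A's pure fold
lemma inner_fold_eq (a : Int) (l : List Int) :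
    ∀ (st : Int × Int × Int × PySem.Dict Int Bool), GoodCache st.2.2.2 →
      ((l.foldl (stepB a) st).1, (l.foldl (stepB a) st).2.1, (l.foldl (stepB a) st).2.2.1)
        = l.foldl (stepA a) (st.1, st.2.1, st.2.2.1) ∧
      GoodCache (l.foldl (stepB a) st).2.2.2 := by
  induction l with
  | nil => intro st h; exact ⟨rfl, h⟩
  | cons b t ih =>
    intro st h
    obtain ⟨p1, p2⟩ := stepB_proj a st b h
    simp only [List.foldl_cons]
    obtain ⟨g1, g2⟩ := ih (stepB a st b) p2
    rw [g1, p1]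
    exact ⟨rfl, g2⟩

-- the outer fold: B's quadruple projects to A's triple fold over the unfiltered range
lemma outer_fold_eq (al : List Int) (bl : List Int) :
    ∀ (st : Int × Int × Int × PySem.Dict Int Bool), GoodCache st.2.2.2 → 0 ≤ st.1 →
      ((al.foldl (fun st a => (bl.filter is_prime).foldl (stepB a) st) st).1,
       (al.foldl (fun st a => (bl.filter is_prime).foldl (stepB a) st) st).2.1,
       (al.foldl (fun st a => (bl.filter is_prime).foldl (stepB a) st) st).2.2.1)
        = al.foldl (fun st a => bl.foldl (stepA a) st) (st.1, st.2.1, st.2.2.1) := by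
  induction al with
  | nil => intro st _ _; rfl
  | cons a t ih =>
    intro st h hn
    simp only [List.foldl_cons]
    obtain ⟨h1, h2⟩ := inner_fold_eq a (bl.filter is_prime) st h
    have hfil : (bl.filter is_prime).foldl (stepA a) (st.1, st.2.1, st.2.2.1)
        = bl.foldl (stepA a) (st.1, st.2.1, st.2.2.1) :=
      (foldl_stepA_filter a bl (st.1, st.2.1, st.2.2.1) hn).symm
    have hnn : 0 ≤ ((bl.filter is_prime).foldl (stepB a) st).1 := by
      have e1 := congrArg Prod.fst h1
      simp only at e1
      rw [e1]
      exact foldl_stepA_nonneg a (bl.filter is_prime) (st.1, st.2.1, st.2.2.1) hn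
    have := ih ((bl.filter is_prime).foldl (stepB a) st) h2 hnn
    rw [this, h1, hfil]

-- ===== VERDICT (by name: the statement is the Claim_ definition above) =====
theorem quadratic_primes_spec : Claim_equal_quadratic_primes := by
  intro al ah bl bh _
  simp only [Spec_quadratic_primes, quadratic_primes, quadratic_primes_alt]
  by_cases hal : ah < al
  · rw [if_pos hal, show PySem.List.pyRange al (ah + 1) 1 = [] from PySem.List.pyRange_one_eq_nil (by omega)]
    simp
  rw [if_neg hal]
  obtain ⟨hbs, hgood⟩ := bs_fold (PySem.List.pyRange 2 (bh + 1) 1)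
    (([] : List Int), (PySem.Dict.empty : PySem.Dict Int Bool)) goodCache_empty
  simp only [List.nil_append] at hbs
  rw [hbs]
  have hout := outer_fold_eq (PySem.List.pyRange al (ah + 1) 1) (PySem.List.pyRange 2 (bh + 1) 1)
    ((0 : Int), (0 : Int), (0 : Int), ((PySem.List.pyRange 2 (bh + 1) 1).foldl bsStep
      (([] : List Int), (PySem.Dict.empty : PySem.Dict Int Bool))).2) hgood (le_refl 0)
  have e2 := congrArg (fun p : Int × Int × Int => p.2.1 * p.2.2) hout
  simp only at e2
  rw [← e2]
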